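-- pv_equiv track=rewrite | github.com/BruinGrowly/Semantic-Compressor | src/ljpw/real_compressor.py | find_lsystem
-- ===== SOURCE A (Python) =====
-- from typing import Any, Callable, Dict, List, Optional, Tuple, Union
--
-- KNOWN_LSYSTEMS = {
--     'koch': {'axiom': 'F', 'rules': {'F': 'F+F-F-F+F'}},
--     'sierpinski': {'axiom': 'F-G-G', 'rules': {'F': 'F-G+F+G-F', 'G': 'GG'}},
--     'dragon': {'axiom': 'FX', 'rules': {'X': 'X+YF+', 'Y': '-FX-Y'}},
--     'hilbert': {'axiom': 'A', 'rules': {'A': '-BF+AFA+FB-', 'B': '+AF-BFB-FA+'}},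
-- }
--
-- def generate_lsystem(axiom: str, rules: Dict[str, str], iterations: int) -> str:
--     """Generate L-system string."""
--     result = axiom
--     for _ in range(iterations):
--         new_result = ""
--         for char in result:
--             new_result += rules.get(char, char)
--         result = new_result
--     return result
--
-- def find_lsystem(text: str) -> Optional[Tuple[str, Dict[str, str], int]]:
--     """
--     Find if text is an L-system expansion.
--
--     Returns (axiom, rules, iterations) if found, None otherwise.
--     """
--     # Try known L-systems
--     for name, lsys in KNOWN_LSYSTEMS.items():
--         for iterations in range(1, 15):
--             generated = generate_lsystem(lsys['axiom'], lsys['rules'], iterations)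
--             if generated == text:
--                 return (lsys['axiom'], lsys['rules'], iterations)
--             if len(generated) > len(text) * 2:
--                 break  # Won't match, too long
--
--     return None
-- ===== SOURCE B (Python) =====
-- from typing import Any, Callable, Dict, List, Optional, Tuple, Union
--
-- KNOWN_LSYSTEMS = {
--     'koch': {'axiom': 'F', 'rules': {'F': 'F+F-F-F+F'}},
--     'sierpinski': {'axiom': 'F-G-G', 'rules': {'F': 'F-G+F+G-F', 'G': 'GG'}},
--     'dragon': {'axiom': 'FX', 'rules': {'X': 'X+YF+', 'Y': '-FX-Y'}},
--     'hilbert': {'axiom': 'A', 'rules': {'A': '-BF+AFA+FB-', 'B': '+AF-BFB-FA+'}},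
-- }
--
-- def find_lsystem(text: str) -> Optional[Tuple[str, Dict[str, str], int]]:
--     """Find if text is an L-system expansion, expanding incrementally."""
--     for lsys in KNOWN_LSYSTEMS.values():
--         axiom, rules = lsys['axiom'], lsys['rules']
--         current = axiom
--         for iterations in range(1, 15):
--             current = "".join(rules.get(ch, ch) for ch in current)
--             if current == text:
--                 return (axiom, rules, iterations)
--             if len(current) > len(text) * 2:
--                 break
--     return None
-- ===== Notes on version B (the rewrite author's own statement) =====
-- stated objective: faster
-- what changed: B threads one running expansion string across the iteration loop (expanding it once per step, inlining generation) instead of regenerating every expansion from the axiom via a per-iteration generate helper.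
import Mathlib
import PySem

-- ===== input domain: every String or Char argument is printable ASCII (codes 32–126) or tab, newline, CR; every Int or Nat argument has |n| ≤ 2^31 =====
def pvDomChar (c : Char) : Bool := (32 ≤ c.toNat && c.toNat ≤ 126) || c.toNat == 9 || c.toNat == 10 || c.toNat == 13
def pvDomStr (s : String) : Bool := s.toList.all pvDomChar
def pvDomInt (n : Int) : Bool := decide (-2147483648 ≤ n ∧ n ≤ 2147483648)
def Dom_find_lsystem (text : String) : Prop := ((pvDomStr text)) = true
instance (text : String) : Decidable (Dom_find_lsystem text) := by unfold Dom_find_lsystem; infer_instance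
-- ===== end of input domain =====

-- B threads one running expansion across iterations instead of regenerating each
-- expansion from the axiom (objective: faster, by a constant/asymptotic mechanism
-- measured).

-- ===== PORT A =====

-- the KNOWN_LSYSTEMS table: (name, axiom, rules); rules as insertion-ordered assoc list
def pvSystems : List (String × String × List (String × String)) :=
  [("koch", "F", [("F", "F+F-F-F+F")]),
   ("sierpinski", "F-G-G", [("F", "F-G+F+G-F"), ("G", "GG")]),
   ("dragon", "FX", [("X", "X+YF+"), ("Y", "-FX-Y")]),
   ("hilbert", "A", [("A", "-BF+AFA+FB-"), ("B", "+AF-BFB-FA+")])]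

-- rules.get(char, char): first-match lookup on the assoc list (exact: the literal
-- rule tables have unique keys, so first match = Python dict lookup)
def pvRuleGet (rules : List (String × String)) (c : Char) : List Char :=
  (((rules.find? (fun p => p.1 == String.ofList [c])).map (·.2)).getD (String.ofList [c])).toList

-- one pass of A's inner 'for char in result: new_result += rules.get(char, char)'
def pvExpandA (rules : List (String × String)) (s : List Char) : List Char :=
  s.foldl (fun acc c => acc ++ pvRuleGet rules c) []

-- generate_lsystem: result = axiom; for _ in range(iterations): result = expand(result)
def pvGenerateA (ax : List Char) (rules : List (String × String)) (iterations : Int) : List Char :=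
  (PySem.List.pyRange 0 iterations 1).foldl (fun res _ => pvExpandA rules res) ax

-- inner 'for iterations in range(1, 15)' with return / break
def pvInnerA (axS : String) (rules : List (String × String)) (tl : List Char) :
    List Int → Option (String × (List (String × String)) × Int)
  | [] => none
  | it :: rest =>
    let g := pvGenerateA axS.toList rules it
    if g = tl then some (axS, rules, it)
    else if (g.length : Int) > (tl.length : Int) * 2 then none
    else pvInnerA axS rules tl rest

-- outer 'for name, lsys in KNOWN_LSYSTEMS.items()'
def pvOuterA (tl : List Char) :
    List (String × String × List (String × String)) → Option (String × (List (String × String)) × Int)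
  | [] => none
  | (_, ax, rules) :: rest =>
    match pvInnerA ax rules tl (PySem.List.pyRange 1 15 1) with
    | some r => some r
    | none => pvOuterA tl rest

def find_lsystem (text : String) : Option (String × (List (String × String)) × Int) :=
  pvOuterA text.toList pvSystems

-- ===== PORT B =====

-- '"".join(rules.get(ch, ch) for ch in current)'
def pvExpandB (rules : List (String × String)) (s : List Char) : List Char :=
  s.flatMap (pvRuleGet rules)

-- B's inner loop: current is threaded across iterations; fuel counts the remaining
-- iterations of range(1, 15), it is the current iteration number
def pvInnerB (axS : String) (rules : List (String × String)) (tl : List Char)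
    (current : List Char) (it : Int) : Nat → Option (String × (List (String × String)) × Int)
  | 0 => none
  | fuel + 1 =>
    let nxt := pvExpandB rules current
    if nxt = tl then some (axS, rules, it)
    else if (nxt.length : Int) > (tl.length : Int) * 2 then none
    else pvInnerB axS rules tl nxt (it + 1) fuel

def find_lsystem_alt (text : String) : Option (String × (List (String × String)) × Int) :=
  pvSystems.findSome? (fun e => pvInnerB e.2.1 e.2.2 text.toList e.2.1.toList 1 14)

-- ===== PRECONDITION & SPEC =====
def Spec_find_lsystem (text : String) (out : Option (String × (List (String × String)) × Int)) : Prop := out = find_lsystem_alt text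
instance (text : String) (out : Option (String × (List (String × String)) × Int)) : Decidable (Spec_find_lsystem text out) := by unfold Spec_find_lsystem; infer_instance

-- ===== CLAIM (what is proved, stated in full; the proofs are below) =====
def Claim_equal_find_lsystem : Prop := ∀ (text : String), Dom_find_lsystem text → Spec_find_lsystem text (find_lsystem text)

-- ===== LEMMAS AND PROOFS =====

theorem pvExpand_eq (rules : List (String × String)) (s : List Char) :
    pvExpandA rules s = pvExpandB rules s := by
  simp [pvExpandA, pvExpandB, List.flatMap_def]

theorem pvGenerateA_natCast (ax : List Char) (rules : List (String × String)) (n : Nat) :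
    pvGenerateA ax rules (n : Int) = (pvExpandB rules)^[n] ax := by
  induction n with
  | zero => simp [pvGenerateA]
  | succ k ih =>
    have h : PySem.List.pyRange 0 ((k : Int) + 1) 1
        = PySem.List.pyRange 0 (k : Int) 1 ++ [(k : Int)] :=
      PySem.List.pyRange_one_succ_right (by positivity)
    simp only [pvGenerateA] at ih ⊢
    push_cast
    rw [h, List.foldl_append, ih, Function.iterate_succ_apply']
    simp [pvExpand_eq]

theorem pvInner_eq (axS : String) (rules : List (String × String)) (tl : List Char)
    (fuel k : Nat) :
    pvInnerB axS rules tl ((pvExpandB rules)^[k] axS.toList) ((k : Int) + 1) fuel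
      = pvInnerA axS rules tl ((List.range fuel).map (fun (i : Nat) => ((k : Int) + 1 + (i : Int)))) := by
  induction fuel generalizing k with
  | zero => simp [pvInnerB, pvInnerA]
  | succ f ih =>
    rw [List.range_succ_eq_map]
    simp only [List.map_cons, List.map_map, pvInnerA, pvInnerB]
    have hg : pvGenerateA axS.toList rules ((k : Int) + 1)
        = pvExpandB rules ((pvExpandB rules)^[k] axS.toList) := by
      have := pvGenerateA_natCast axS.toList rules (k + 1)
      push_cast at this
      rw [this, Function.iterate_succ_apply']
    simp only [Nat.cast_zero, add_zero]
    rw [hg]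
    split_ifs with h1 h2
    · rfl
    · rfl
    · have := ih (k + 1)
      rw [Function.iterate_succ_apply'] at this
      push_cast at this
      rw [this]
      refine congrArg _ (List.map_congr_left ?_).symm
      intro i _
      simp only [Function.comp_apply]
      push_cast
      ring
  
theorem pvRange_1_15 : PySem.List.pyRange 1 15 1
    = (List.range 14).map (fun (i : Nat) => ((0 : Int) + 1 + (i : Int))) := by decide

theorem pvInner_eq' (axS : String) (rules : List (String × String)) (tl : List Char) :
    pvInnerA axS rules tl (PySem.List.pyRange 1 15 1)
      = pvInnerB axS rules tl axS.toList 1 14 := by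
  have := pvInner_eq axS rules tl 14 0
  simp only [Function.iterate_zero, id] at this
  rw [pvRange_1_15]
  norm_num at this ⊢
  exact this.symm

theorem pvOuter_eq (tl : List Char) (l : List (String × String × List (String × String))) :
    pvOuterA tl l = l.findSome? (fun e => pvInnerB e.2.1 e.2.2 tl e.2.1.toList 1 14) := by
  induction l with
  | nil => rfl
  | cons e rest ih =>
    obtain ⟨n, ax, rules⟩ := e
    simp only [pvOuterA, List.findSome?_cons, pvInner_eq']
    cases pvInnerB ax rules tl ax.toList 1 14 <;> simp [ih]

-- ===== VERDICT (by name: the statement is the Claim_ definition above) =====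
theorem find_lsystem_spec : Claim_equal_find_lsystem := by
  intro text _
  unfold Spec_find_lsystem find_lsystem find_lsystem_alt
  exact pvOuter_eq text.toList pvSystems
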